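-- pv_equiv track=rewrite | github.com/PopSquatch19/WSU_Sports_Analytics | HW3.py | all_games
-- ===== SOURCE A (Python) =====
-- def all_games(wsu_games):
--
--      new_dict = {}
--
--      for year in wsu_games.keys():
--           for school in wsu_games.get(year,{}).keys():
--                if school in new_dict.keys():
--                     new_dict[school][year] = wsu_games.get(year).get(school)
--                else:
--                     new_dict[school] = {}
--                     new_dict[school][year] = wsu_games.get(year).get(school)
--      return new_dict
-- ===== SOURCE B (Python) =====
-- def all_games(wsu_games):
--     # school-major transpose: collect schools in first-appearance order, then
--     # build each school's year->score dict by one scan over the years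
--     schools = list(dict.fromkeys(s for year in wsu_games for s in wsu_games[year]))
--     return {s: {year: games[s] for year, games in wsu_games.items() if s in games}
--             for s in schools}
-- ===== Notes on version B (the rewrite author's own statement) =====
-- stated objective: alternative
-- what changed: Replaces A's year-major loop with lazy per-school initialisation by a school-major build: one scan collects the schools in first-appearance order, then a nested comprehension builds each school's year dict directly, eliminating the membership/empty-dict-init branch.
import Mathlib
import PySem

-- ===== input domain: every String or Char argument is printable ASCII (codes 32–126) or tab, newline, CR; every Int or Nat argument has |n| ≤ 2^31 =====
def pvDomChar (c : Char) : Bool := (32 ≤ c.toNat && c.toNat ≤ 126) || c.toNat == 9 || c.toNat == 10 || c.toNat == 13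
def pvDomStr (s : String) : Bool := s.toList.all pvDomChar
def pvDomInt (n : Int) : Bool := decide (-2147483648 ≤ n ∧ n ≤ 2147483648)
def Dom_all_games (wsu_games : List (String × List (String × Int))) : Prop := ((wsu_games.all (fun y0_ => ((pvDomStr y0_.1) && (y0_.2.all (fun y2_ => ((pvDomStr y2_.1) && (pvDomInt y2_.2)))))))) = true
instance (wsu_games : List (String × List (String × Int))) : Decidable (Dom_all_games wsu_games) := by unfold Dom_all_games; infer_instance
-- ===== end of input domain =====

-- B transposes school-major (collect schools once, then build each school's year dict) instead of
-- A's year-major loop with lazy per-school init; alternative decomposition, same cost.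


-- ===== PORT A =====
-- dict helpers over association lists (exact dict semantics on lists with unique keys,
-- which Pre_all_games guarantees): lookup = first match, setitem overwrites in place,
-- a new key appends at the end.
def pyDictGet? {α : Type} (d : List (String × α)) (k : String) : Option α :=
  (d.find? (fun q => q.1 == k)).map (·.2)

def pyDictSet {α : Type} (d : List (String × α)) (k : String) (v : α) : List (String × α) :=
  if (d.find? (fun q => q.1 == k)).isSome then
    d.map (fun q => if q.1 == k then (q.1, v) else q)
  else d ++ [(k, v)]

def pyDictModify {α : Type} (d : List (String × α)) (k : String) (f : α → α) : List (String × α) :=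
  d.map (fun q => if q.1 == k then (q.1, f q.2) else q)

def all_games (wsu_games : List (String × List (String × Int))) : List (String × List (String × Int)) :=
  wsu_games.foldl (fun nd p =>
    ((pyDictGet? wsu_games p.1).getD []).foldl (fun nd q =>
      -- wsu_games.get(year).get(school): school is a key of that dict, so the default is unreachable
      let v := (pyDictGet? ((pyDictGet? wsu_games p.1).getD []) q.1).getD 0
      if (pyDictGet? nd q.1).isSome then
        pyDictModify nd q.1 (fun inner => pyDictSet inner p.1 v)
      else
        pyDictModify (nd ++ [(q.1, [])]) q.1 (fun inner => pyDictSet inner p.1 v)) nd) []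

-- ===== PORT B =====
-- list(dict.fromkeys(...)): schools in first-appearance order
def collectSchools (wsu_games : List (String × List (String × Int))) : List String :=
  wsu_games.foldl (fun acc p =>
    p.2.foldl (fun acc q => if acc.contains q.1 then acc else acc ++ [q.1]) acc) []

-- {year: games[s] for year, games in wsu_games.items() if s in games}
def schoolYears (wsu_games : List (String × List (String × Int))) (s : String) : List (String × Int) :=
  wsu_games.foldl (fun acc p =>
    match p.2.find? (fun q => q.1 == s) with
    | some q => acc ++ [(p.1, q.2)]
    | none => acc) []

def all_games_alt (wsu_games : List (String × List (String × Int))) : List (String × List (String × Int)) :=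
  (collectSchools wsu_games).map (fun s => (s, schoolYears wsu_games s))

-- ===== PRECONDITION & SPEC =====
-- Pre_ excludes association lists with duplicate year keys or duplicate school keys within a
-- year: those lists do not represent a Python dict (conversion to a dict collapses them), so
-- any behaviour of the ports there is an artefact of the list encoding.
def Pre_all_games (wsu_games : List (String × List (String × Int))) : Prop :=
  (wsu_games.map (·.1)).Nodup ∧ ∀ p ∈ wsu_games, (p.2.map (·.1)).Nodup
instance (wsu_games : List (String × List (String × Int))) : Decidable (Pre_all_games wsu_games) := by unfold Pre_all_games; infer_instance

def pvWitness_all_games : (List (String × List (String × Int))) :=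
  [("2018", [("WSU", 3), ("UW", 1)]), ("2019", [("WSU", 2)])]

def Spec_all_games (wsu_games : List (String × List (String × Int))) (out : List (String × List (String × Int))) : Prop := out = all_games_alt wsu_games
instance (wsu_games : List (String × List (String × Int))) (out : List (String × List (String × Int))) : Decidable (Spec_all_games wsu_games out) := by unfold Spec_all_games; infer_instance

-- ===== CLAIM (what is proved, stated in full; the proofs are below) =====
def Claim_equal_all_games : Prop := ∀ (wsu_games : List (String × List (String × Int))), Dom_all_games wsu_games → Pre_all_games wsu_games → Spec_all_games wsu_games (all_games wsu_games)

-- ===== LEMMAS AND PROOFS =====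
-- proof-only helpers
def flatG (wsu : List (String × List (String × Int))) : List (String × String × Int) :=
  wsu.flatMap (fun p => p.2.map (fun q => (p.1, q.1, q.2)))

def stepG (nd : List (String × List (String × Int))) (t : String × String × Int) :
    List (String × List (String × Int)) :=
  if (pyDictGet? nd t.2.1).isSome then
    pyDictModify nd t.2.1 (fun inner => pyDictSet inner t.1 t.2.2)
  else
    pyDictModify (nd ++ [(t.2.1, [])]) t.2.1 (fun inner => pyDictSet inner t.1 t.2.2)

def dedupG (l : List String) : List String :=
  l.foldl (fun acc s => if acc.contains s then acc else acc ++ [s]) []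

def innerG (L : List (String × String × Int)) (s : String) : List (String × Int) :=
  (L.filter (fun t => t.2.1 == s)).map (fun t => (t.1, t.2.2))

def GG (L : List (String × String × Int)) : List (String × List (String × Int)) :=
  (dedupG (L.map (·.2.1))).map (fun s => (s, innerG L s))

def CC (L : List (String × String × Int)) : Prop :=
  List.Pairwise (fun a b => a.2.1 = b.2.1 → a.1 ≠ b.1) L

-- generic fold lemmas
theorem foldl_flatMap' {α β γ : Type} (l : List α) (g : α → List β) (f : γ → β → γ) (init : γ) :
    (l.flatMap g).foldl f init = l.foldl (fun acc a => (g a).foldl f acc) init := by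
  induction l generalizing init with
  | nil => rfl
  | cons a l ih => simp [List.flatMap_cons, List.foldl_append, ih]

-- assoc-list lookup under nodup keys
theorem find?_key_self {α : Type} (l : List (String × α)) (h : (l.map (·.1)).Nodup)
    {p : String × α} (hp : p ∈ l) : l.find? (fun q => q.1 == p.1) = some p := by
  induction l with
  | nil => cases hp
  | cons b l ih =>
    have h' : (b.1 :: l.map (·.1)).Nodup := by simpa using h
    have hmem : b.1 ∉ l.map (·.1) := (List.nodup_cons.mp h').1
    have htl : (l.map (·.1)).Nodup := (List.nodup_cons.mp h').2
    rcases List.mem_cons.mp hp with hb | hm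
    · subst hb; exact List.find?_cons_of_pos (by simp)
    · have hb : (b.1 == p.1) = false := by
        simp only [beq_eq_false_iff_ne, ne_eq]
        intro he
        exact hmem (he ▸ List.mem_map_of_mem (f := (·.1)) hm)
      rw [List.find?_cons_of_neg (by simp [hb])]
      exact ih htl hm

theorem pyDictGet?_self {α : Type} (l : List (String × α)) (h : (l.map (·.1)).Nodup)
    {p : String × α} (hp : p ∈ l) : pyDictGet? l p.1 = some p.2 := by
  simp [pyDictGet?, find?_key_self l h hp]

theorem filter_key_eq_find? {α : Type} (l : List (String × α)) (h : (l.map (·.1)).Nodup)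
    (s : String) : l.filter (fun q => q.1 == s) = (l.find? (fun q => q.1 == s)).toList := by
  induction l with
  | nil => rfl
  | cons b l ih =>
    have h' : (b.1 :: l.map (·.1)).Nodup := by simpa using h
    have hmem : b.1 ∉ l.map (·.1) := (List.nodup_cons.mp h').1
    have htl : (l.map (·.1)).Nodup := (List.nodup_cons.mp h').2
    by_cases hb : b.1 = s
    · rw [List.filter_cons_of_pos (by simp [hb]), List.find?_cons_of_pos (by simp [hb])]
      have hnil : l.filter (fun q => q.1 == s) = [] := by
        rw [List.filter_eq_nil_iff]
        intro q hq he
        have hq1 : q.1 = s := by simpa using he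
        apply hmem
        rw [hb, ← hq1]
        exact List.mem_map_of_mem (f := (·.1)) hq
      simp [hnil]
    · rw [List.filter_cons_of_neg (by simp [hb]), List.find?_cons_of_neg (by simp [hb])]
      exact ih htl

-- dedup facts
theorem mem_dedupG_fold (l : List String) (acc : List String) (a : String) :
    a ∈ l.foldl (fun acc s => if acc.contains s then acc else acc ++ [s]) acc ↔ a ∈ acc ∨ a ∈ l := by
  induction l generalizing acc with
  | nil => simp
  | cons s l ih =>
    simp only [List.foldl_cons]
    by_cases hs : acc.contains s
    · rw [if_pos hs, ih]
      constructor
      · rintro (h | h)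
        · exact Or.inl h
        · exact Or.inr (List.mem_cons_of_mem _ h)
      · rintro (h | h)
        · exact Or.inl h
        · rcases List.mem_cons.mp h with h | h
          · exact Or.inl (h ▸ (by simpa using hs))
          · exact Or.inr h
    · rw [if_neg hs, ih]
      simp only [List.mem_append, List.mem_cons]
      tauto

theorem mem_dedupG (l : List String) (a : String) : a ∈ dedupG l ↔ a ∈ l := by
  unfold dedupG
  rw [mem_dedupG_fold l [] a]
  simp

theorem dedupG_append_singleton (l : List String) (s : String) :
    dedupG (l ++ [s]) = if s ∈ l then dedupG l else dedupG l ++ [s] := by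
  unfold dedupG
  rw [List.foldl_append]
  simp only [List.foldl_cons, List.foldl_nil]
  have hc : (List.foldl (fun acc s => if acc.contains s then acc else acc ++ [s]) [] l).contains s = true ↔ s ∈ l := by
    rw [List.contains_iff_mem]
    exact mem_dedupG l s
  by_cases hs : s ∈ l
  · rw [if_pos (hc.mpr hs), if_pos hs]
  · rw [if_neg (fun hh => hs (hc.mp hh)), if_neg hs]

-- membership of G's keys
theorem pyDictGet?_GG_isSome (L : List (String × String × Int)) (s : String) :
    (pyDictGet? (GG L) s).isSome = true ↔ s ∈ L.map (·.2.1) := by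
  unfold pyDictGet? GG
  rw [List.find?_map]
  simp only [Option.isSome_map, Function.comp_def]
  rw [List.find?_isSome]
  constructor
  · rintro ⟨x, hx, he⟩
    have : x = s := by simpa using he
    exact (mem_dedupG _ _).mp (this ▸ hx)
  · intro hs
    exact ⟨s, (mem_dedupG _ _).mpr hs, by simp⟩

theorem pyDictModify_map_form (l : List String) (f : String → List (String × Int))
    (s : String) (g : List (String × Int) → List (String × Int)) :
    pyDictModify (l.map (fun a => (a, f a))) s g
      = l.map (fun a => (a, if a = s then g (f a) else f a)) := by
  unfold pyDictModify
  rw [List.map_map]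
  apply List.map_congr_left
  intro a _
  by_cases hs : a = s
  · simp [hs]
  · simp [hs]

theorem innerG_append_singleton (L : List (String × String × Int)) (t : String × String × Int)
    (s : String) : innerG (L ++ [t]) s
      = innerG L s ++ (if t.2.1 = s then [(t.1, t.2.2)] else []) := by
  unfold innerG
  rw [List.filter_append, List.map_append]
  congr 1
  by_cases hs : t.2.1 = s
  · simp [hs]
  · simp [hs]

theorem innerG_eq_nil (L : List (String × String × Int)) (s : String)
    (h : s ∉ L.map (·.2.1)) : innerG L s = [] := by
  unfold innerG
  have : L.filter (fun t => t.2.1 == s) = [] := by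
    rw [List.filter_eq_nil_iff]
    intro t ht he
    have : t.2.1 = s := by simpa using he
    exact h (this ▸ List.mem_map_of_mem (f := (·.2.1)) ht)
  simp [this]

-- main build lemma
theorem fold_stepG_eq_GG (L : List (String × String × Int)) (h : CC L) :
    L.foldl stepG [] = GG L := by
  induction L using List.reverseRecOn with
  | nil => rfl
  | append_singleton M t ih =>
    unfold CC at h
    have hparts := List.pairwise_append.mp h
    have hM : CC M := hparts.1
    have hcross : ∀ a ∈ M, a.2.1 = t.2.1 → a.1 ≠ t.1 := by
      intro a ha
      exact hparts.2.2 a ha t (by simp)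
    rw [List.foldl_append, List.foldl_cons, List.foldl_nil, ih hM]
    unfold stepG
    by_cases hmem : t.2.1 ∈ M.map (·.2.1)
    · rw [if_pos ((pyDictGet?_GG_isSome M t.2.1).mpr hmem)]
      show pyDictModify ((dedupG (M.map (·.2.1))).map (fun a => (a, innerG M a))) t.2.1 _ = GG (M ++ [t])
      rw [pyDictModify_map_form]
      unfold GG
      rw [List.map_append]
      simp only [List.map_cons, List.map_nil]
      rw [dedupG_append_singleton, if_pos hmem]
      apply List.map_congr_left
      intro a ha
      rw [innerG_append_singleton]
      by_cases has : a = t.2.1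
      · rw [if_pos has, if_pos has.symm, has]
        have hfind : (innerG M t.2.1).find? (fun q => q.1 == t.1) = none := by
          rw [List.find?_eq_none]
          intro q hq
          unfold innerG at hq
          simp only [List.mem_map, List.mem_filter] at hq
          obtain ⟨t', ⟨ht'M, hsch⟩, hq'⟩ := hq
          have h1 : q.1 = t'.1 := by rw [← hq']
          simp only [h1, ne_eq, beq_iff_eq]
          exact hcross t' ht'M (by simpa using hsch)
        unfold pyDictSet
        rw [hfind]
        simp
      · rw [if_neg has, if_neg (fun he => has he.symm)]
        simp
    · rw [if_neg (fun hh => hmem ((pyDictGet?_GG_isSome M t.2.1).mp hh))]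
      have hsplit : pyDictModify (GG M ++ [(t.2.1, [])]) t.2.1
            (fun inner => pyDictSet inner t.1 t.2.2)
          = pyDictModify (GG M) t.2.1 (fun inner => pyDictSet inner t.1 t.2.2)
            ++ [(t.2.1, pyDictSet [] t.1 t.2.2)] := by
        unfold pyDictModify
        rw [List.map_append]
        simp
      rw [hsplit]
      have hfix : pyDictModify (GG M) t.2.1 (fun inner => pyDictSet inner t.1 t.2.2) = GG M := by
        show pyDictModify ((dedupG (M.map (·.2.1))).map (fun a => (a, innerG M a))) t.2.1 _
          = (dedupG (M.map (·.2.1))).map (fun a => (a, innerG M a))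
        rw [pyDictModify_map_form]
        apply List.map_congr_left
        intro a ha
        have has : a ≠ t.2.1 := fun he => hmem (he ▸ (mem_dedupG _ _).mp ha)
        simp [has]
      rw [hfix]
      have hset : pyDictSet ([] : List (String × Int)) t.1 t.2.2 = [(t.1, t.2.2)] := by
        simp [pyDictSet]
      rw [hset]
      unfold GG
      rw [List.map_append]
      simp only [List.map_cons, List.map_nil]
      rw [dedupG_append_singleton, if_neg hmem, List.map_append]
      congr 1
      · apply List.map_congr_left
        intro a ha
        have has : a ≠ t.2.1 := fun he => hmem (he ▸ (mem_dedupG _ _).mp ha)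
        rw [innerG_append_singleton, if_neg (fun he => has he.symm)]
        simp
      · simp only [List.map_cons, List.map_nil]
        rw [innerG_append_singleton, if_pos rfl, innerG_eq_nil M t.2.1 hmem]
        simp

theorem flatG_fst_mem (wsu : List (String × List (String × Int)))
    {t : String × String × Int} (ht : t ∈ flatG wsu) : t.1 ∈ wsu.map (·.1) := by
  unfold flatG at ht
  simp only [List.mem_flatMap, List.mem_map] at ht
  obtain ⟨p, hp, q, _, hq⟩ := ht
  rw [List.mem_map]
  exact ⟨p, hp, by rw [← hq]⟩

theorem flatG_CC (wsu : List (String × List (String × Int))) (h : Pre_all_games wsu) :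
    CC (flatG wsu) := by
  induction wsu with
  | nil => exact List.Pairwise.nil
  | cons p rest ih =>
    have houter : p.1 ∉ rest.map (·.1) ∧ (rest.map (·.1)).Nodup := by
      have := h.1
      simp only [List.map_cons, List.nodup_cons] at this
      exact this
    have hrest : Pre_all_games rest :=
      ⟨houter.2, fun q hq => h.2 q (List.mem_cons_of_mem _ hq)⟩
    show CC (p.2.map (fun q => (p.1, q.1, q.2)) ++ flatG rest)
    unfold CC
    rw [List.pairwise_append]
    refine ⟨?_, ih hrest, ?_⟩
    · rw [List.pairwise_map]
      have hin : (p.2.map (·.1)).Nodup := h.2 p (List.mem_cons_self)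
      rw [List.Nodup, List.pairwise_map] at hin
      exact hin.imp (fun hne => fun he _ => absurd he hne)
    · intro a ha b hb
      have ha1 : a.1 = p.1 := by
        simp only [List.mem_map] at ha
        obtain ⟨q, _, hq⟩ := ha
        rw [← hq]
      have hb1 : b.1 ∈ rest.map (·.1) := flatG_fst_mem rest hb
      intro _ he
      exact houter.1 (ha1 ▸ he ▸ hb1)

theorem A_eq_fold (wsu : List (String × List (String × Int))) (h : Pre_all_games wsu) :
    all_games wsu = (flatG wsu).foldl stepG [] := by
  unfold all_games flatG
  rw [foldl_flatMap']
  apply PySem.List.foldl_congr_mem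
  intro nd p hp
  have hget : pyDictGet? wsu p.1 = some p.2 := pyDictGet?_self wsu h.1 hp
  rw [hget]
  simp only [Option.getD_some, List.foldl_map]
  apply PySem.List.foldl_congr_mem
  intro acc q hq
  have hv : pyDictGet? p.2 q.1 = some q.2 := pyDictGet?_self p.2 (h.2 p hp) hq
  rw [hv]
  simp [stepG]

theorem B_eq_GG (wsu : List (String × List (String × Int))) (h : Pre_all_games wsu) :
    all_games_alt wsu = GG (flatG wsu) := by
  have part1 : collectSchools wsu = dedupG ((flatG wsu).map (·.2.1)) := by
    unfold collectSchools dedupG flatG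
    rw [List.map_flatMap, foldl_flatMap']
    simp only [List.map_map, List.foldl_map]
    rfl
  have part2 : ∀ s, schoolYears wsu s = innerG (flatG wsu) s := by
    intro s
    have hmatch : schoolYears wsu s
        = wsu.foldl (fun acc p => acc ++ (p.2.filter (fun q => q.1 == s)).map (fun q => (p.1, q.2))) [] := by
      unfold schoolYears
      apply PySem.List.foldl_congr_mem
      intro acc p hp
      rw [filter_key_eq_find? p.2 (h.2 p hp) s]
      cases hf : p.2.find? (fun q => q.1 == s) <;> simp
    rw [hmatch, PySem.List.foldl_append_eq_flatMap, List.nil_append]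
    unfold innerG flatG
    rw [List.filter_flatMap, List.map_flatMap]
    congr 1
    funext p
    rw [List.filter_map, List.map_map]
    rfl
  unfold all_games_alt GG
  rw [part1]
  apply List.map_congr_left
  intro s _
  rw [part2 s]

-- ===== VERDICT (by name: the statement is the Claim_ definition above) =====
theorem all_games_spec : Claim_equal_all_games := by
  intro wsu _ hpre
  unfold Spec_all_games
  rw [A_eq_fold wsu hpre, B_eq_GG wsu hpre, fold_stepG_eq_GG _ (flatG_CC wsu hpre)]
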